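-- pv_equiv track=rewrite | github.com/gridvisi/Python_workspace | Zero 2 Hero Class/array/Nest/6 kyu Maximum Depth of Nested Brackets.py | strings_in_max_depth
-- ===== SOURCE A (Python) =====
-- def strings_in_max_depth(s):
--     start, deepest, lvl, out = 0, 0, 0, [s]
--
--     for i, c in enumerate(s):
--         if c == ')':
--             if lvl == deepest: out.append(s[start:i])
--             lvl -= 1
--         elif c == '(':
--             lvl += 1
--             start = i + 1
--
--         if lvl > deepest:
--             out, deepest = [], lvl
--
--     return out
-- ===== SOURCE B (Python) =====
-- def strings_in_max_depth(s):
--     # pass 1: the maximum nesting level ever reached (0 if '(' never raises it)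
--     lvl, deepest = 0, 0
--     for c in s:
--         if c == '(':
--             lvl += 1
--             if lvl > deepest:
--                 deepest = lvl
--         elif c == ')':
--             lvl -= 1
--     # pass 2: collect the contents closed at exactly that level
--     out = [s] if deepest == 0 else []
--     lvl, start = 0, 0
--     for i, c in enumerate(s):
--         if c == '(':
--             lvl += 1
--             start = i + 1
--         elif c == ')':
--             if lvl == deepest:
--                 out.append(s[start:i])
--             lvl -= 1
--     return out
-- ===== Notes on version B (the rewrite author's own statement) =====
-- stated objective: alternative
-- what changed: B computes the maximum nesting depth in a first pass and then collects the max-depth slices in a second pass, instead of A's single pass that discards and restarts its accumulator every time a deeper level is discovered.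
import Mathlib
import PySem

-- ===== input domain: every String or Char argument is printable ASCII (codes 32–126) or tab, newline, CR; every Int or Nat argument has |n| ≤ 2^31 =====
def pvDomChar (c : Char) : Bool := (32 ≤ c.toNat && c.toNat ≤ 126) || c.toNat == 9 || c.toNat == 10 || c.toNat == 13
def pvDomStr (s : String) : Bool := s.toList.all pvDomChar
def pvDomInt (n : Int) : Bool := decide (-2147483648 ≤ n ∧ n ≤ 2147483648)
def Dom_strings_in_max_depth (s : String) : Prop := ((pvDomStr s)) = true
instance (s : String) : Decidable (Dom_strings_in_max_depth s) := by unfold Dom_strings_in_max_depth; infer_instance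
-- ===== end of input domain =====

-- B is an alternative same-cost decomposition: a depth-finding pass then a collecting pass,
-- instead of A's single pass that resets its accumulator whenever a new maximum depth appears.

-- ===== PORT A =====
-- A's single loop; the trailing `if lvl > deepest: out, deepest = [], lvl` check is
-- distributed into the three branches (same state values in every case).
def pvA_loop (s : String) (l : List (Int × Char)) (start deepest lvl : Int)
    (out : List String) : List String :=
  match l with
  | [] => out
  | (i, c) :: rest =>
    if c = ')' then
      let out' := if lvl = deepest then out ++ [PySem.Str.slice s (some start) (some i)] else out
      if lvl - 1 > deepest then pvA_loop s rest start (lvl - 1) (lvl - 1) []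
      else pvA_loop s rest start deepest (lvl - 1) out'
    else if c = '(' then
      if lvl + 1 > deepest then pvA_loop s rest (i + 1) (lvl + 1) (lvl + 1) []
      else pvA_loop s rest (i + 1) deepest (lvl + 1) out
    else
      if lvl > deepest then pvA_loop s rest start lvl lvl []
      else pvA_loop s rest start deepest lvl out

def strings_in_max_depth (s : String) : List String :=
  pvA_loop s (PySem.List.enumerate s.toList 0) 0 0 0 [s]

-- ===== PORT B =====
-- B pass 1: maximum level ever reached
def pvB_depth (l : List Char) (lvl deepest : Int) : Int :=
  match l with
  | [] => deepest
  | c :: rest =>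
    if c = '(' then
      pvB_depth rest (lvl + 1) (if lvl + 1 > deepest then lvl + 1 else deepest)
    else if c = ')' then pvB_depth rest (lvl - 1) deepest
    else pvB_depth rest lvl deepest

-- B pass 2: collect slices closed at level `d`
def pvB_loop (s : String) (d : Int) (l : List (Int × Char)) (lvl start : Int)
    (out : List String) : List String :=
  match l with
  | [] => out
  | (i, c) :: rest =>
    if c = '(' then pvB_loop s d rest (lvl + 1) (i + 1) out
    else if c = ')' then
      pvB_loop s d rest (lvl - 1) start
        (if lvl = d then out ++ [PySem.Str.slice s (some start) (some i)] else out)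
    else pvB_loop s d rest lvl start out

def strings_in_max_depth_alt (s : String) : List String :=
  let deepest := pvB_depth s.toList 0 0
  pvB_loop s deepest (PySem.List.enumerate s.toList 0) 0 0
    (if deepest = 0 then [s] else [])

-- ===== PRECONDITION & SPEC =====
def Spec_strings_in_max_depth (s : String) (out : List String) : Prop := out = strings_in_max_depth_alt s
instance (s : String) (out : List String) : Decidable (Spec_strings_in_max_depth s out) := by unfold Spec_strings_in_max_depth; infer_instance

-- ===== CLAIM (what is proved, stated in full; the proofs are below) =====
def Claim_equal_strings_in_max_depth : Prop := ∀ (s : String), Dom_strings_in_max_depth s → Spec_strings_in_max_depth s (strings_in_max_depth s)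

-- ===== LEMMAS AND PROOFS =====

-- the deepest-so-far argument only ever grows
theorem pvB_depth_ge (l : List Char) : ∀ (lvl d : Int), d ≤ pvB_depth l lvl d := by
  induction l with
  | nil => intro lvl d; simp [pvB_depth]
  | cons c rest ih =>
    intro lvl d
    simp only [pvB_depth]
    split_ifs with h1 h2 h3
    · exact le_trans (by omega) (ih (lvl + 1) (lvl + 1))
    · exact ih (lvl + 1) d
    · exact ih (lvl - 1) d
    · exact ih lvl d

-- pvB_loop's accumulator is a pure left appender
theorem pvB_loop_append (s : String) (d : Int) (l : List (Int × Char)) :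
    ∀ (lvl start : Int) (out : List String),
    pvB_loop s d l lvl start out = out ++ pvB_loop s d l lvl start [] := by
  induction l with
  | nil => intro lvl start out; simp [pvB_loop]
  | cons p rest ih =>
    intro lvl start out
    obtain ⟨i, c⟩ := p
    simp only [pvB_loop]
    split_ifs with h1 h2 h3
    · exact ih (lvl + 1) (i + 1) out
    · rw [ih (lvl - 1) start (out ++ _), ih (lvl - 1) start ([] ++ _)]
      simp
    · rw [ih (lvl - 1) start out]
    · exact ih lvl start out

-- Main invariant: A's loop from a state with lvl ≤ deepest equals B's collector run at the
-- final maximum depth, keeping the incoming accumulator only if no deeper level appears later.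
theorem pvA_eq_pvB (s : String) (l : List (Int × Char)) :
    ∀ (start deepest lvl : Int) (out : List String), lvl ≤ deepest →
    pvA_loop s l start deepest lvl out =
      (if pvB_depth (l.map (·.2)) lvl deepest = deepest then out else []) ++
        pvB_loop s (pvB_depth (l.map (·.2)) lvl deepest) l lvl start [] := by
  induction l with
  | nil => intro start deepest lvl out _; simp [pvA_loop, pvB_loop, pvB_depth]
  | cons p rest ih =>
    intro start deepest lvl out hle
    obtain ⟨i, c⟩ := p
    by_cases hc : c = ')'
    · -- closing bracket: lvl-1 > deepest impossible
      subst hc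
      have hD := pvB_depth_ge (rest.map (·.2)) (lvl - 1) deepest
      have hstep : pvB_depth (((i, (')' : Char)) :: rest).map (·.2)) lvl deepest =
          pvB_depth (rest.map (·.2)) (lvl - 1) deepest := by simp [pvB_depth]
      rw [hstep]
      generalize hDdef : pvB_depth (rest.map (·.2)) (lvl - 1) deepest = D at hD ⊢
      have hA : pvA_loop s ((i, (')' : Char)) :: rest) start deepest lvl out =
          pvA_loop s rest start deepest (lvl - 1)
            (if lvl = deepest then out ++ [PySem.Str.slice s (some start) (some i)] else out) := by
        simp [pvA_loop, show ¬ lvl - 1 > deepest by omega]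
      have hB : pvB_loop s D ((i, (')' : Char)) :: rest) lvl start [] =
          (if lvl = D then [PySem.Str.slice s (some start) (some i)] else []) ++
            pvB_loop s D rest (lvl - 1) start [] := by
        rw [show pvB_loop s D ((i, (')' : Char)) :: rest) lvl start [] =
            pvB_loop s D rest (lvl - 1) start
              (if lvl = D then [] ++ [PySem.Str.slice s (some start) (some i)] else []) from by
          simp [pvB_loop]]
        rw [pvB_loop_append s D rest (lvl - 1) start]
        by_cases hld : lvl = D <;> simp [hld]
      rw [hA, ih start deepest (lvl - 1) _ (by omega), hDdef, hB]
      by_cases hDd : D = deepest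
      · subst hDd
        by_cases hld : lvl = D <;> simp [hld]
      · have hlD : lvl ≠ D := by omega
        simp [hDd, hlD]
    · by_cases ho : c = '('
      · -- opening bracket
        by_cases hnew : lvl + 1 > deepest
        · -- new maximum: A resets out, B's depth argument rises
          have hstep : pvB_depth ((((i, c)) :: rest).map (·.2)) lvl deepest =
              pvB_depth (rest.map (·.2)) (lvl + 1) (lvl + 1) := by
            simp [pvB_depth, ho, hnew]
          rw [hstep]
          set D := pvB_depth (rest.map (·.2)) (lvl + 1) (lvl + 1) with hDdef
          have hD : lvl + 1 ≤ D := pvB_depth_ge _ _ _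
          simp only [pvA_loop, pvB_loop, ho, if_pos hnew]
          rw [ih (i + 1) (lvl + 1) (lvl + 1) [] (le_refl _), ← hDdef]
          have hDd : D ≠ deepest := by omega
          simp [hDd]
        · -- still below the maximum
          have hstep : pvB_depth ((((i, c)) :: rest).map (·.2)) lvl deepest =
              pvB_depth (rest.map (·.2)) (lvl + 1) deepest := by
            simp [pvB_depth, ho, hnew]
          rw [hstep]
          simp only [pvA_loop, pvB_loop, ho, if_neg hnew]
          exact ih (i + 1) deepest (lvl + 1) out (by omega)
      · -- any other character
        have hstep : pvB_depth ((((i, c)) :: rest).map (·.2)) lvl deepest =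
            pvB_depth (rest.map (·.2)) lvl deepest := by
          simp [pvB_depth, ho, hc]
        rw [hstep]
        simp only [pvA_loop, pvB_loop, if_neg hc, if_neg ho,
          if_neg (by omega : ¬ lvl > deepest)]
        exact ih start deepest lvl out hle

-- ===== VERDICT (by name: the statement is the Claim_ definition above) =====
theorem strings_in_max_depth_spec : Claim_equal_strings_in_max_depth := by
  intro s _
  unfold Spec_strings_in_max_depth strings_in_max_depth strings_in_max_depth_alt
  rw [pvA_eq_pvB s _ 0 0 0 [s] (le_refl 0)]
  rw [PySem.List.map_snd_enumerate]
  rw [pvB_loop_append s _ _ 0 0 (if pvB_depth s.toList 0 0 = 0 then [s] else [])]
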